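-- pv_equiv track=rewrite | github.com/JonathanBeltranNeri/IA-P2 | Busqueda_En_Grafos/Búsqueda Informada/010_Busquedas_A_y_AO_Estrella.py | busqueda_ao_estrella
-- ===== SOURCE A (Python) =====
-- def busqueda_ao_estrella(grafo, heuristica, nodo_actual):
--     if nodo_actual not in grafo or grafo[nodo_actual] == []:
--         return [nodo_actual]
--
--     mejor_opcion = []
--     mejor_costo = float('inf')
--
--     for opcion in grafo[nodo_actual]:  # opción: lista AND de subnodos
--         costo_total = 0
--         solucion = []
--
--         for subnodo in opcion:
--             sub_solucion = busqueda_ao_estrella(grafo, heuristica, subnodo)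
--             solucion.extend(sub_solucion)
--             costo_total += heuristica.get(subnodo, 0)
--
--         if costo_total < mejor_costo:
--             mejor_costo = costo_total
--             mejor_opcion = [nodo_actual] + solucion
--
--     return mejor_opcion
-- ===== SOURCE B (Python) =====
-- def busqueda_ao_estrella(grafo, heuristica, nodo_actual):
--     # Select-then-expand: the cost of an option only depends on the heuristics of its
--     # direct subnodes, so pick each node's cheapest option first and expand only the
--     # winner; losing options are never expanded recursively.
--     def costo(opcion):
--         c = 0
--         for s in opcion:
--             c += heuristica.get(s, 0)
--         return c
--
--     def mejor_opcion(opciones):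
--         mejor = opciones[0]
--         for o in opciones[1:]:
--             if costo(o) < costo(mejor):
--                 mejor = o
--         return mejor
--
--     def expandir(nodo):
--         opciones = grafo.get(nodo)
--         if not opciones:
--             return [nodo]
--         camino = [nodo]
--         for s in mejor_opcion(opciones):
--             camino += expandir(s)
--         return camino
--
--     return expandir(nodo_actual)
-- ===== Notes on version B (the rewrite author's own statement) =====
-- stated objective: alternative
-- what changed: B replaces A's expand-every-option recursion by select-then-expand: since an option's cost only depends on the heuristics of its direct subnodes, B picks each node's cheapest option with an argmin pass over direct costs and recursively expands only the winning option, never the losing ones.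
import Mathlib
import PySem

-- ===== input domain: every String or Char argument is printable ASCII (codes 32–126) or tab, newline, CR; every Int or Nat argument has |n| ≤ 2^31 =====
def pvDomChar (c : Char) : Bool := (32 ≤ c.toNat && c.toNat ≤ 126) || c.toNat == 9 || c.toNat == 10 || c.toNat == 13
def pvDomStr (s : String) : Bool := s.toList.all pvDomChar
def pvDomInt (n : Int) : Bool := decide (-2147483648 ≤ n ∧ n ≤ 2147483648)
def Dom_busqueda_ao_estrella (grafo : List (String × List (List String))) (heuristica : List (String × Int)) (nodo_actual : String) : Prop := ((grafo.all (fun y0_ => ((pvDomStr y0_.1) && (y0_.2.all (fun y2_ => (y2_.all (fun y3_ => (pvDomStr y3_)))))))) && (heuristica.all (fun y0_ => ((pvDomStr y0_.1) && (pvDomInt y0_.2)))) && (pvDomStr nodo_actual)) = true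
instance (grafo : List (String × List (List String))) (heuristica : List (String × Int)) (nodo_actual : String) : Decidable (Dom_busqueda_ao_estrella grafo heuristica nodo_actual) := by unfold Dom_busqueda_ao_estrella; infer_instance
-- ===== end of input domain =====

-- B is select-then-expand: an option's cost only depends on the direct subnodes'
-- heuristics, so B picks each node's cheapest option by a cheap argmin pass and
-- recursively expands only the winner; equivalence of the return values is proved on
-- Pre_, the inputs on which Python A terminates (no reachable node lies on a cycle).

-- ===== PORT A =====
-- dict lookup (first match) and heuristica.get(s, 0)
def pvGetDict {α : Type} (d : List (String × α)) (x : String) : Option α :=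
  match d.find? (fun p => p.1 == x) with
  | some p => some p.2
  | none => none

def pvHeur (heuristica : List (String × Int)) (s : String) : Int :=
  (pvGetDict heuristica s).getD 0

-- Python A recurses without bound on a cycle reachable from nodo_actual (RecursionError);
-- the port takes fuel grafo.length + 1, which Pre_ makes sufficient, so the fuel-exhausted
-- branch is unreachable on Pre_.  mejor_costo = float('inf') is modelled as Option Int
-- (none = +inf), exact because every comparison is with an int sum.
def goA (grafo : List (String × List (List String))) (heuristica : List (String × Int)) :
    Nat → String → List String
  | 0, _ => []
  | f+1, x =>
    match pvGetDict grafo x with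
    | none => [x]
    | some opts =>
      if opts = [] then [x]
      else
        (opts.foldl
          (fun (acc : List String × Option Int) opcion =>
            let r := opcion.foldl
              (fun (st : Int × List String) s =>
                (st.1 + pvHeur heuristica s, st.2 ++ goA grafo heuristica f s)) (0, [])
            match acc.2 with
            | none => (x :: r.2, some r.1)
            | some c => if r.1 < c then (x :: r.2, some r.1) else acc)
          ([], none)).1

def busqueda_ao_estrella (grafo : List (String × List (List String))) (heuristica : List (String × Int)) (nodo_actual : String) : List String :=
  goA grafo heuristica (grafo.length + 1) nodo_actual

-- ===== PORT B =====
-- costo(opcion): sum of the heuristics of the direct subnodes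
def pvCosto (heuristica : List (String × Int)) (opcion : List String) : Int :=
  opcion.foldl (fun c s => c + pvHeur heuristica s) 0

-- mejor_opcion(opciones): first option of minimal cost (explicit argmin loop)
def pvMejorOpcion (heuristica : List (String × Int)) (o : List String)
    (os : List (List String)) : List String :=
  os.foldl (fun mejor o' =>
    if pvCosto heuristica o' < pvCosto heuristica mejor then o' else mejor) o

-- expandir(nodo), with the same fuel device as A's port (Pre_ makes it sufficient)
def goExp (grafo : List (String × List (List String))) (heuristica : List (String × Int)) :
    Nat → String → List String
  | 0, _ => []
  | f+1, x =>
    match pvGetDict grafo x with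
    | none => [x]
    | some [] => [x]
    | some (o :: os) =>
      (pvMejorOpcion heuristica o os).foldl
        (fun camino s => camino ++ goExp grafo heuristica f s) [x]

def busqueda_ao_estrella_alt (grafo : List (String × List (List String))) (heuristica : List (String × Int)) (nodo_actual : String) : List String :=
  goExp grafo heuristica (grafo.length + 1) nodo_actual

-- ===== PRECONDITION & SPEC =====
-- successors of a node: all subnodes of all of its options
def pvSuccs (grafo : List (String × List (List String))) (x : String) : List String :=
  match pvGetDict grafo x with
  | none => []
  | some opts => opts.flatten

def pvStep (grafo : List (String × List (List String))) (S : List String) : List String :=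
  (S ++ S.flatMap (pvSuccs grafo)).dedup

def pvUniv (grafo : List (String × List (List String))) : List String :=
  (grafo.flatMap (fun p => p.2.flatten)).dedup

-- nodes reachable from x in at least one step (iterated to a fixpoint)
def pvReach (grafo : List (String × List (List String))) (x : String) : List String :=
  (pvStep grafo)^[(pvUniv grafo).length + 1] ((pvSuccs grafo x).dedup)

-- Pre_ excludes exactly the inputs on which Python A never returns (RecursionError):
-- those where some node reachable from nodo_actual lies on a cycle; it also requires
-- association lists without duplicate keys, which cannot arise from a Python dict.
def Pre_busqueda_ao_estrella (grafo : List (String × List (List String))) (heuristica : List (String × Int)) (nodo_actual : String) : Prop :=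
  (grafo.map Prod.fst).Nodup ∧ (heuristica.map Prod.fst).Nodup ∧
  ∀ p ∈ grafo, (p.1 = nodo_actual ∨ p.1 ∈ pvReach grafo nodo_actual) →
    p.1 ∉ pvReach grafo p.1

instance (grafo : List (String × List (List String))) (heuristica : List (String × Int)) (nodo_actual : String) : Decidable (Pre_busqueda_ao_estrella grafo heuristica nodo_actual) := by
  unfold Pre_busqueda_ao_estrella; infer_instance

def pvWitness_busqueda_ao_estrella : (List (String × List (List String))) × (List (String × Int)) × String :=
  ([("A", [["B", "C"], ["D"]]), ("B", [["D"]]), ("C", []), ("D", [])],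
   [("B", 1), ("C", 2), ("D", 3)], "A")

def Spec_busqueda_ao_estrella (grafo : List (String × List (List String))) (heuristica : List (String × Int)) (nodo_actual : String) (out : List String) : Prop := out = busqueda_ao_estrella_alt grafo heuristica nodo_actual
instance (grafo : List (String × List (List String))) (heuristica : List (String × Int)) (nodo_actual : String) (out : List String) : Decidable (Spec_busqueda_ao_estrella grafo heuristica nodo_actual out) := by unfold Spec_busqueda_ao_estrella; infer_instance

-- ===== CLAIM (what is proved, stated in full; the proofs are below) =====
def Claim_equal_busqueda_ao_estrella : Prop := ∀ (grafo : List (String × List (List String))) (heuristica : List (String × Int)) (nodo_actual : String), Dom_busqueda_ao_estrella grafo heuristica nodo_actual → Pre_busqueda_ao_estrella grafo heuristica nodo_actual → Spec_busqueda_ao_estrella grafo heuristica nodo_actual (busqueda_ao_estrella grafo heuristica nodo_actual)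

-- ===== LEMMAS AND PROOFS =====

def pvStartOK (grafo : List (String × List (List String))) (nodo_actual x : String) : Prop :=
  x = nodo_actual ∨ x ∈ pvReach grafo nodo_actual

theorem pv_mem_step (grafo : List (String × List (List String))) (S : List String) (a : String) :
    a ∈ pvStep grafo S ↔ a ∈ S ∨ ∃ z ∈ S, a ∈ pvSuccs grafo z := by
  simp [pvStep, List.mem_dedup, List.mem_append, List.mem_flatMap]

theorem pv_subset_step (grafo : List (String × List (List String))) (S : List String) :
    S ⊆ pvStep grafo S := by
  intro a ha; rw [pv_mem_step]; exact Or.inl ha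

theorem pv_step_mono (grafo : List (String × List (List String))) {S T : List String}
    (h : S ⊆ T) : pvStep grafo S ⊆ pvStep grafo T := by
  intro a ha
  rw [pv_mem_step] at *
  rcases ha with ha | ⟨z, hz, haz⟩
  · exact Or.inl (h ha)
  · exact Or.inr ⟨z, h hz, haz⟩

theorem pv_iter_closed (grafo : List (String × List (List String))) {S T : List String}
    (hT : pvStep grafo T ⊆ T) (hS : S ⊆ T) : ∀ k, (pvStep grafo)^[k] S ⊆ T := by
  intro k
  induction k with
  | zero => exact hS
  | succ k ih =>
    rw [Function.iterate_succ_apply']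
    exact fun a ha => hT (pv_step_mono grafo ih ha)

theorem pv_subset_iter (grafo : List (String × List (List String))) (S : List String) :
    ∀ k, S ⊆ (pvStep grafo)^[k] S := by
  intro k
  induction k with
  | zero => exact fun a ha => ha
  | succ k ih =>
    rw [Function.iterate_succ_apply']
    exact fun a ha => pv_subset_step grafo _ (ih ha)

theorem pv_key_mem (grafo : List (String × List (List String))) {α : Type}
    {d : List (String × α)} {x : String} {v : α} (hx : pvGetDict d x = some v) :
    ∃ p ∈ d, p.1 = x ∧ p.2 = v := by
  unfold pvGetDict at hx
  cases hf : d.find? (fun p => p.1 == x) with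
  | none => simp [hf] at hx
  | some p =>
    simp [hf] at hx
    refine ⟨p, List.mem_of_find?_eq_some hf, ?_, hx⟩
    have := List.find?_some hf
    simpa using this

theorem pv_succs_sub_univ (grafo : List (String × List (List String))) (z : String) :
    pvSuccs grafo z ⊆ pvUniv grafo := by
  unfold pvSuccs
  cases hz : pvGetDict grafo z with
  | none => intro a ha; simp at ha
  | some opts =>
    intro a ha
    rcases pv_key_mem grafo hz with ⟨p, hp, _, hp2⟩
    unfold pvUniv
    rw [List.mem_dedup, List.mem_flatMap]
    exact ⟨p, hp, by rw [hp2]; exact ha⟩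

theorem pv_sub_univ (grafo : List (String × List (List String))) {S : List String}
    (hS : S ⊆ pvUniv grafo) : ∀ k, (pvStep grafo)^[k] S ⊆ pvUniv grafo := by
  intro k
  induction k with
  | zero => exact hS
  | succ k ih =>
    rw [Function.iterate_succ_apply']
    intro a ha
    rw [pv_mem_step] at ha
    rcases ha with ha | ⟨z, _, haz⟩
    · exact ih ha
    · exact pv_succs_sub_univ grafo z haz

theorem pv_reach_fix (grafo : List (String × List (List String))) (x : String) :
    pvStep grafo (pvReach grafo x) ⊆ pvReach grafo x := by
  set S0 := (pvSuccs grafo x).dedup with hS0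
  set N := (pvUniv grafo).length + 1 with hN
  have hS0univ : S0 ⊆ pvUniv grafo := by
    intro a ha
    rw [hS0, List.mem_dedup] at ha
    exact pv_succs_sub_univ grafo x ha
  have hstab : ∃ i, i < N ∧ pvStep grafo ((pvStep grafo)^[i] S0) ⊆ (pvStep grafo)^[i] S0 := by
    by_contra hno
    push_neg at hno
    have hgrow : ∀ i, i ≤ N → i ≤ ((pvStep grafo)^[i] S0).toFinset.card := by
      intro i
      induction i with
      | zero => intro _; exact Nat.zero_le _
      | succ i ih =>
        intro hiN
        have hi := ih (by omega)
        have hw := hno i (by omega)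
        rw [List.subset_def] at hw
        push_neg at hw
        obtain ⟨a, haS, haN⟩ := hw
        have hsub : ((pvStep grafo)^[i] S0).toFinset ⊂ ((pvStep grafo)^[i+1] S0).toFinset := by
          constructor
          · intro b hb
            rw [List.mem_toFinset] at *
            rw [Function.iterate_succ_apply']
            exact pv_subset_step grafo _ hb
          · intro hcon
            apply haN
            have : a ∈ ((pvStep grafo)^[i+1] S0).toFinset := by
              rw [List.mem_toFinset, Function.iterate_succ_apply']
              exact haS
            have := hcon this
            rwa [List.mem_toFinset] at this
        have := Finset.card_lt_card hsub
        omega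
    have hbig := hgrow N (le_refl _)
    have hsmall : ((pvStep grafo)^[N] S0).toFinset.card ≤ (pvUniv grafo).length := by
      calc ((pvStep grafo)^[N] S0).toFinset.card
          ≤ (pvUniv grafo).toFinset.card := by
            apply Finset.card_le_card
            intro a ha
            rw [List.mem_toFinset] at *
            exact pv_sub_univ grafo hS0univ N ha
        _ ≤ (pvUniv grafo).length := List.toFinset_card_le _
    omega
  obtain ⟨i, hiN, hclosed⟩ := hstab
  have hreach_eq : pvReach grafo x ⊆ (pvStep grafo)^[i] S0 := by
    have : (pvStep grafo)^[N] S0 = (pvStep grafo)^[N - i] ((pvStep grafo)^[i] S0) := by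
      rw [← Function.iterate_add_apply]
      congr 1
      omega
    rw [pvReach, ← hS0, ← hN, this]
    exact pv_iter_closed grafo hclosed (fun a ha => ha) (N - i)
  have hback : (pvStep grafo)^[i] S0 ⊆ pvReach grafo x := by
    rw [pvReach, ← hS0, ← hN]
    have : (pvStep grafo)^[N] S0 = (pvStep grafo)^[N - i] ((pvStep grafo)^[i] S0) := by
      rw [← Function.iterate_add_apply]
      congr 1
      omega
    rw [this]
    exact pv_subset_iter grafo _ (N - i)
  intro a ha
  exact hback (hclosed (pv_step_mono grafo hreach_eq ha))

theorem pv_succs_sub_reach (grafo : List (String × List (List String))) (x : String) :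
    pvSuccs grafo x ⊆ pvReach grafo x := by
  intro a ha
  rw [pvReach]
  exact pv_subset_iter grafo _ _ (by rw [List.mem_dedup]; exact ha)

theorem pv_reach_closed (grafo : List (String × List (List String))) {x y : String}
    (hy : y ∈ pvReach grafo x) : pvSuccs grafo y ⊆ pvReach grafo x := by
  intro a ha
  exact pv_reach_fix grafo x (by rw [pv_mem_step]; exact Or.inr ⟨y, hy, ha⟩)

theorem pv_reach_sub (grafo : List (String × List (List String))) {x y : String}
    (hy : y ∈ pvReach grafo x) : pvReach grafo y ⊆ pvReach grafo x := by
  rw [pvReach]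
  apply pv_iter_closed grafo (pv_reach_fix grafo x)
  intro a ha
  rw [List.mem_dedup] at ha
  exact pv_reach_closed grafo hy ha

-- the measure: number of distinct keys reachable from x (plus one if x is itself a key)
def pvKeyset (grafo : List (String × List (List String))) (x : String) : Finset String :=
  ((pvReach grafo x).filter (fun z => (pvGetDict grafo z).isSome)).toFinset

def pvM (grafo : List (String × List (List String))) (x : String) : Nat :=
  (pvKeyset grafo x).card + (if (pvGetDict grafo x).isSome then 1 else 0)

theorem pv_keyset_mono (grafo : List (String × List (List String))) {x s : String}
    (h : pvReach grafo s ⊆ pvReach grafo x) : pvKeyset grafo s ⊆ pvKeyset grafo x := by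
  intro a ha
  unfold pvKeyset at *
  rw [List.mem_toFinset, List.mem_filter] at *
  exact ⟨h ha.1, ha.2⟩

-- an edge reachable from nodo_actual strictly decreases the measure
theorem pv_M_lt (grafo : List (String × List (List String))) (nodo_actual : String)
    (hcyc : ∀ p ∈ grafo, (p.1 = nodo_actual ∨ p.1 ∈ pvReach grafo nodo_actual) →
      p.1 ∉ pvReach grafo p.1)
    {x s : String} {opts : List (List String)} {opcion : List String}
    (hst : pvStartOK grafo nodo_actual x)
    (hx : pvGetDict grafo x = some opts) (ho : opcion ∈ opts) (hs : s ∈ opcion) :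
    pvStartOK grafo nodo_actual s ∧ pvM grafo s < pvM grafo x := by
  have hss : s ∈ pvSuccs grafo x := by
    unfold pvSuccs
    rw [hx]
    exact List.mem_flatten.2 ⟨opcion, ho, hs⟩
  have hsrx : s ∈ pvReach grafo x := pv_succs_sub_reach grafo x hss
  have hsr0 : s ∈ pvReach grafo nodo_actual := by
    rcases hst with h | h
    · rw [← h]; exact hsrx
    · exact pv_reach_sub grafo h hsrx
  have hsub : pvReach grafo s ⊆ pvReach grafo x := pv_reach_sub grafo hsrx
  have hK := pv_keyset_mono grafo hsub
  have hcard := Finset.card_le_card hK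
  refine ⟨Or.inr hsr0, ?_⟩
  unfold pvM
  rw [hx]
  cases hkey : (pvGetDict grafo s) with
  | none => simp [hkey]; omega
  | some opts2 =>
    rcases pv_key_mem grafo hkey with ⟨p, hpmem, hp1, _⟩
    have hnotin : s ∉ pvReach grafo s := by
      have := hcyc p hpmem (by rw [hp1]; exact Or.inr hsr0)
      rwa [hp1] at this
    have hsKx : s ∈ pvKeyset grafo x := by
      unfold pvKeyset
      rw [List.mem_toFinset, List.mem_filter]
      exact ⟨hsrx, by rw [hkey]; rfl⟩
    have hsKs : s ∉ pvKeyset grafo s := by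
      unfold pvKeyset
      rw [List.mem_toFinset, List.mem_filter]
      intro hcon
      exact hnotin hcon.1
    have herase : pvKeyset grafo s ⊆ (pvKeyset grafo x).erase s :=
      Finset.subset_erase.2 ⟨hK, hsKs⟩
    have h1 := Finset.card_le_card herase
    have h2 := Finset.card_erase_of_mem hsKx
    have h3 := Finset.card_pos.2 ⟨s, hsKx⟩
    simp [hkey]
    omega

theorem pv_M_le (grafo : List (String × List (List String))) (nodo_actual : String)
    (hcyc : ∀ p ∈ grafo, (p.1 = nodo_actual ∨ p.1 ∈ pvReach grafo nodo_actual) →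
      p.1 ∉ pvReach grafo p.1)
    {x : String} (hst : pvStartOK grafo nodo_actual x) :
    pvM grafo x ≤ grafo.length := by
  have hkeys : pvKeyset grafo x ⊆ (grafo.map Prod.fst).toFinset := by
    intro a ha
    unfold pvKeyset at ha
    rw [List.mem_toFinset, List.mem_filter] at ha
    cases hga : pvGetDict grafo a with
    | none => rw [hga] at ha; simp at ha
    | some v =>
      rcases pv_key_mem grafo hga with ⟨p, hpmem, hp1, _⟩
      rw [List.mem_toFinset, List.mem_map]
      exact ⟨p, hpmem, hp1⟩
  have hlen : (grafo.map Prod.fst).toFinset.card ≤ grafo.length := by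
    have := List.toFinset_card_le (grafo.map Prod.fst)
    simpa using this
  unfold pvM
  cases hga : pvGetDict grafo x with
  | none =>
    have := Finset.card_le_card hkeys
    simp [hga]
    omega
  | some v =>
    rcases pv_key_mem grafo hga with ⟨p, hpmem, hp1, _⟩
    have hnotin : x ∉ pvReach grafo x := by
      have := hcyc p hpmem (by rw [hp1]; exact hst)
      rwa [hp1] at this
    have hxKeys : x ∈ (grafo.map Prod.fst).toFinset := by
      rw [List.mem_toFinset, List.mem_map]
      exact ⟨p, hpmem, hp1⟩
    have herase : pvKeyset grafo x ⊆ (grafo.map Prod.fst).toFinset.erase x := by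
      apply Finset.subset_erase.2
      refine ⟨hkeys, ?_⟩
      unfold pvKeyset
      rw [List.mem_toFinset, List.mem_filter]
      intro hcon
      exact hnotin hcon.1
    have h1 := Finset.card_le_card herase
    have h2 := Finset.card_erase_of_mem hxKeys
    have h3 := Finset.card_pos.2 ⟨x, hxKeys⟩
    simp [hga]
    omega

-- the canonical value: A's recursion run with just enough fuel
def pvVal (grafo : List (String × List (List String))) (heuristica : List (String × Int)) (x : String) : List String :=
  goA grafo heuristica (pvM grafo x + 1) x

-- A's result does not depend on the fuel, as long as the fuel exceeds the measure
theorem goA_fuel (grafo : List (String × List (List String))) (heuristica : List (String × Int))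
    (nodo_actual : String)
    (hcyc : ∀ p ∈ grafo, (p.1 = nodo_actual ∨ p.1 ∈ pvReach grafo nodo_actual) →
      p.1 ∉ pvReach grafo p.1) :
    ∀ R x, pvStartOK grafo nodo_actual x → pvM grafo x ≤ R → ∀ f g, R < f → R < g →
      goA grafo heuristica f x = goA grafo heuristica g x := by
  intro R
  induction R using Nat.strong_induction_on with
  | _ R IH =>
    intro x hst hxR f g hf hg
    match f, g with
    | f'+1, g'+1 =>
      show goA grafo heuristica (f'+1) x = goA grafo heuristica (g'+1) x
      simp only [goA]
      cases hx : pvGetDict grafo x with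
      | none => rfl
      | some opts =>
        by_cases hopts : opts = []
        · simp [hopts]
        · simp only [hopts, if_false]
          congr 1
          apply PySem.List.foldl_congr_mem
          intro acc opcion hmem
          have hinner :
              opcion.foldl (fun (st : Int × List String) s =>
                  (st.1 + pvHeur heuristica s, st.2 ++ goA grafo heuristica f' s)) (0, []) =
              opcion.foldl (fun (st : Int × List String) s =>
                  (st.1 + pvHeur heuristica s, st.2 ++ goA grafo heuristica g' s)) (0, []) := by
            apply PySem.List.foldl_congr_mem
            intro st s hsmem
            obtain ⟨hst', hlt⟩ := pv_M_lt grafo nodo_actual hcyc hst hx hmem hsmem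
            have := IH (pvM grafo s) (by omega) s hst' (le_refl _) f' g' (by omega) (by omega)
            rw [this]
          simp only [hinner]

theorem goA_eq_val (grafo : List (String × List (List String))) (heuristica : List (String × Int))
    (nodo_actual : String)
    (hcyc : ∀ p ∈ grafo, (p.1 = nodo_actual ∨ p.1 ∈ pvReach grafo nodo_actual) →
      p.1 ∉ pvReach grafo p.1)
    {x : String} (hst : pvStartOK grafo nodo_actual x) (f : Nat) (hf : pvM grafo x < f) :
    goA grafo heuristica f x = pvVal grafo heuristica x := by
  exact goA_fuel grafo heuristica nodo_actual hcyc (pvM grafo x) x hst (le_refl _) f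
    (pvM grafo x + 1) hf (by omega)

-- value of a leaf
theorem pvVal_leaf (grafo : List (String × List (List String))) (heuristica : List (String × Int))
    (x : String)
    (h : pvGetDict grafo x = none ∨ pvGetDict grafo x = some []) :
    pvVal grafo heuristica x = [x] := by
  unfold pvVal
  rcases h with h | h <;> simp [goA, h]

-- the path of an option: concatenation of the canonical values of its subnodes
def pvPath (grafo : List (String × List (List String))) (heuristica : List (String × Int))
    (opcion : List String) : List String :=
  opcion.flatMap (pvVal grafo heuristica)

-- A's inner (subnode) fold, with goA replaced by pvVal, computes (cost, path)
theorem pv_inner_char (grafo : List (String × List (List String)))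
    (heuristica : List (String × Int)) (opcion : List String) :
    ∀ (c : Int) (cam : List String),
      opcion.foldl (fun (st : Int × List String) s =>
        (st.1 + pvHeur heuristica s, st.2 ++ pvVal grafo heuristica s)) (c, cam) =
      (c + pvCosto heuristica opcion, cam ++ pvPath grafo heuristica opcion) := by
  induction opcion with
  | nil => intro c cam; simp [pvCosto, pvPath]
  | cons s rest ih =>
    intro c cam
    simp only [List.foldl_cons]
    rw [ih]
    have hc : pvCosto heuristica (s :: rest) = pvHeur heuristica s + pvCosto heuristica rest := by
      unfold pvCosto
      simp only [List.foldl_cons, PySem.List.foldl_add, Int.zero_add]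
    have hp : pvPath grafo heuristica (s :: rest) =
        pvVal grafo heuristica s ++ pvPath grafo heuristica rest := by
      simp [pvPath]
    rw [hc, hp]
    simp [add_assoc]

-- A's selection fold equals select-by-argmin (induction generalizing the current best)
theorem pv_sel_char (grafo : List (String × List (List String)))
    (heuristica : List (String × Int)) (x : String) :
    ∀ (os : List (List String)) (b : List String),
      os.foldl (fun (acc : List String × Option Int) opcion =>
        match acc.2 with
        | none => (x :: pvPath grafo heuristica opcion, some (pvCosto heuristica opcion))
        | some c => if pvCosto heuristica opcion < c then
            (x :: pvPath grafo heuristica opcion, some (pvCosto heuristica opcion)) else acc)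
        (x :: pvPath grafo heuristica b, some (pvCosto heuristica b)) =
      (x :: pvPath grafo heuristica (pvMejorOpcion heuristica b os),
       some (pvCosto heuristica (pvMejorOpcion heuristica b os))) := by
  intro os
  induction os with
  | nil => intro b; simp [pvMejorOpcion]
  | cons o' rest ih =>
    intro b
    simp only [List.foldl_cons, pvMejorOpcion] at *
    by_cases h : pvCosto heuristica o' < pvCosto heuristica b
    · simp only [h, if_true]
      exact ih o'
    · simp only [h, if_false]
      exact ih b

-- the argmin stays in the list
theorem pv_mejor_mem (heuristica : List (String × Int)) :
    ∀ (os : List (List String)) (o : List String),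
      pvMejorOpcion heuristica o os ∈ o :: os := by
  intro os
  induction os with
  | nil => intro o; simp [pvMejorOpcion]
  | cons o' rest ih =>
    intro o
    simp only [pvMejorOpcion, List.foldl_cons]
    by_cases h : pvCosto heuristica o' < pvCosto heuristica o
    · simp only [h, if_true]
      have := ih o'
      simp only [pvMejorOpcion] at this
      rcases List.mem_cons.1 this with h' | h'
      · exact List.mem_cons.2 (Or.inr (List.mem_cons.2 (Or.inl h')))
      · exact List.mem_cons.2 (Or.inr (List.mem_cons.2 (Or.inr h')))
    · simp only [h, if_false]
      have := ih o
      simp only [pvMejorOpcion] at this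
      rcases List.mem_cons.1 this with h' | h'
      · exact List.mem_cons.2 (Or.inl h')
      · exact List.mem_cons.2 (Or.inr (List.mem_cons.2 (Or.inr h')))

-- the canonical value of a non-leaf key: the node followed by the path of its argmin option
theorem pvVal_node (grafo : List (String × List (List String))) (heuristica : List (String × Int))
    (nodo_actual : String)
    (hcyc : ∀ p ∈ grafo, (p.1 = nodo_actual ∨ p.1 ∈ pvReach grafo nodo_actual) →
      p.1 ∉ pvReach grafo p.1)
    {x : String} (hst : pvStartOK grafo nodo_actual x)
    {o : List String} {os : List (List String)}
    (hx : pvGetDict grafo x = some (o :: os)) :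
    pvVal grafo heuristica x =
      x :: pvPath grafo heuristica (pvMejorOpcion heuristica o os) := by
  unfold pvVal
  simp only [goA, hx]
  rw [if_neg (by simp)]
  have hsubst :
      (o :: os).foldl (fun (acc : List String × Option Int) opcion =>
        let r := opcion.foldl
          (fun (st : Int × List String) s =>
            (st.1 + pvHeur heuristica s, st.2 ++ goA grafo heuristica (pvM grafo x) s)) (0, [])
        match acc.2 with
        | none => (x :: r.2, some r.1)
        | some c => if r.1 < c then (x :: r.2, some r.1) else acc) ([], none) =
      (o :: os).foldl (fun (acc : List String × Option Int) opcion =>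
        match acc.2 with
        | none => (x :: pvPath grafo heuristica opcion, some (pvCosto heuristica opcion))
        | some c => if pvCosto heuristica opcion < c then
            (x :: pvPath grafo heuristica opcion, some (pvCosto heuristica opcion)) else acc)
        ([], none) := by
    apply PySem.List.foldl_congr_mem
    intro acc opcion hmem
    have h1 :
        opcion.foldl (fun (st : Int × List String) s =>
          (st.1 + pvHeur heuristica s, st.2 ++ goA grafo heuristica (pvM grafo x) s)) (0, []) =
        opcion.foldl (fun (st : Int × List String) s =>
          (st.1 + pvHeur heuristica s, st.2 ++ pvVal grafo heuristica s)) (0, []) := by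
      apply PySem.List.foldl_congr_mem
      intro st s hsmem
      obtain ⟨hst', hlt⟩ := pv_M_lt grafo nodo_actual hcyc hst hx hmem hsmem
      rw [goA_eq_val grafo heuristica nodo_actual hcyc hst' (pvM grafo x) hlt]
    rw [h1, pv_inner_char]
    simp
  rw [hsubst]
  simp only [List.foldl_cons]
  rw [pv_sel_char grafo heuristica x os o]

-- B's expansion computes the canonical value (strong induction on the measure)
theorem goExp_ok (grafo : List (String × List (List String))) (heuristica : List (String × Int))
    (nodo_actual : String)
    (hcyc : ∀ p ∈ grafo, (p.1 = nodo_actual ∨ p.1 ∈ pvReach grafo nodo_actual) →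
      p.1 ∉ pvReach grafo p.1) :
    ∀ R x f, pvStartOK grafo nodo_actual x → pvM grafo x ≤ R → R < f →
      goExp grafo heuristica f x = pvVal grafo heuristica x := by
  intro R
  induction R using Nat.strong_induction_on with
  | _ R IH =>
    intro x f hst hxR hf
    obtain ⟨f', rfl⟩ : ∃ f', f = f' + 1 := ⟨f - 1, by omega⟩
    simp only [goExp]
    cases hx : pvGetDict grafo x with
    | none => exact (pvVal_leaf grafo heuristica x (Or.inl hx)).symm
    | some opts =>
      cases opts with
      | nil => exact (pvVal_leaf grafo heuristica x (Or.inr hx)).symm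
      | cons o os =>
        have hmem : pvMejorOpcion heuristica o os ∈ o :: os := pv_mejor_mem heuristica os o
        have hsubst :
            (pvMejorOpcion heuristica o os).foldl
              (fun camino s => camino ++ goExp grafo heuristica f' s) [x] =
            (pvMejorOpcion heuristica o os).foldl
              (fun camino s => camino ++ pvVal grafo heuristica s) [x] := by
          apply PySem.List.foldl_congr_mem
          intro camino s hsmem
          obtain ⟨hst', hlt⟩ := pv_M_lt grafo nodo_actual hcyc hst hx hmem hsmem
          rw [IH (pvM grafo s) (by omega) s f' hst' (le_refl _) (by omega)]
        show List.foldl (fun camino s => camino ++ goExp grafo heuristica f' s) [x]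
          (pvMejorOpcion heuristica o os) = pvVal grafo heuristica x
        rw [hsubst, PySem.List.foldl_append_eq_flatMap]
        rw [pvVal_node grafo heuristica nodo_actual hcyc hst hx]
        simp [pvPath]

-- ===== VERDICT (by name: the statement is the Claim_ definition above) =====
theorem busqueda_ao_estrella_spec : Claim_equal_busqueda_ao_estrella := by
  intro grafo heuristica nodo_actual _hdom hpre
  rcases hpre with ⟨_, _, hcyc⟩
  unfold Spec_busqueda_ao_estrella busqueda_ao_estrella busqueda_ao_estrella_alt
  have hst : pvStartOK grafo nodo_actual nodo_actual := Or.inl rfl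
  have hM := pv_M_le grafo nodo_actual hcyc hst
  have hA := goA_eq_val grafo heuristica nodo_actual hcyc hst (grafo.length + 1) (by omega)
  have hB := goExp_ok grafo heuristica nodo_actual hcyc (pvM grafo nodo_actual) nodo_actual
    (grafo.length + 1) hst (le_refl _) (by omega)
  rw [hA, hB]
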